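-- pv_equiv track=rewrite | github.com/andywiecko/pystrel | pystrel/sectors.py | generate_mixing_sectors
-- ===== SOURCE A (Python) =====
-- def generate_mixing_sectors(
--     ranks: set[int], sectors: list[tuple[int, int]]
-- ) -> list[tuple[int, int]]:
--     """
--     Generates mixing sectors assuming `ranks` and `sectors`.
--
--     Parameters
--     ----------
--     ranks : set[int]
--         Set with mixing ranks used for generation.
--     sectors : list[tuple[int, int]]
--         List of sectors with `(sites, particles)`.
--         Sectors **must** be sorted by `sites` and `particles`.
--
--     Returns
--     -------
--     list[tuple[int, int]]
--         List of mixing sectors with `(sector id0, sector id1)`.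
--     """
--     mixing_sectors: list[tuple[int, int]] = []
--     count = len(sectors)
--     for id0 in range(count):
--         s0 = sectors[id0]
--         for id1 in range(id0 + 1, count):
--             s1 = sectors[id1]
--             if s1[1] - s0[1] in ranks:
--                 mixing_sectors.append((id0, id1))
--
--     return mixing_sectors
-- ===== SOURCE B (Python) =====
-- def generate_mixing_sectors(
--     ranks: set[int], sectors: list[tuple[int, int]]
-- ) -> list[tuple[int, int]]:
--     # Bucket sector indices by particle count once, precompute per distinct
--     # particle count the sorted merge of all rank-reachable buckets, then emit
--     # each id0's partners from that shared list.
--     buckets: dict[int, list[int]] = {}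
--     for i, s in enumerate(sectors):
--         buckets.setdefault(s[1], []).append(i)
--     merged: dict[int, list[int]] = {}
--     for p0 in buckets:
--         acc: list[int] = []
--         for p1, idxs in buckets.items():
--             if p1 - p0 in ranks:
--                 acc.extend(idxs)
--         acc.sort()
--         merged[p0] = acc
--     out: list[tuple[int, int]] = []
--     for id0, s0 in enumerate(sectors):
--         out.extend((id0, id1) for id1 in merged[s0[1]] if id1 > id0)
--     return out
-- ===== Notes on version B (the rewrite author's own statement) =====
-- stated objective: alternative
-- what changed: Replaces the all-pairs index scan by grouping sector indices into per-particle-count buckets, precomputing for each distinct particle count the sorted merge of its rank-reachable buckets, and emitting each id0's partners from that shared list.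
import Mathlib
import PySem

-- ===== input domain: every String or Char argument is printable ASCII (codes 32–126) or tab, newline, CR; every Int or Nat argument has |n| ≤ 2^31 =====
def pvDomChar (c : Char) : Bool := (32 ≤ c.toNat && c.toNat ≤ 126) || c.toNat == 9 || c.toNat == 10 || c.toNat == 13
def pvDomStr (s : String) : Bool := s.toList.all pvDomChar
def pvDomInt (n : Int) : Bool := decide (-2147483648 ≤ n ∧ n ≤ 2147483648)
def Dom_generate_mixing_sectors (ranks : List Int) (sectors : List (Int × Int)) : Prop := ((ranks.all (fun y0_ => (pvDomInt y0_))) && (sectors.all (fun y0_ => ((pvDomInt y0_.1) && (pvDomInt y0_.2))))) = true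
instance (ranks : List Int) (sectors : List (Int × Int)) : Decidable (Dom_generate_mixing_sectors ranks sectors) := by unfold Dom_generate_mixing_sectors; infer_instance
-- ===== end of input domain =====

-- B replaces A's all-pairs scan by bucketing indices by particle count, precomputing per distinct
-- particle count the sorted merge of its rank-reachable buckets, and reading each id0's partners
-- off that shared list (objective: alternative algorithm).
-- ===== PORT A =====
def generate_mixing_sectors (ranks : List Int) (sectors : List (Int × Int)) : List (Int × Int) :=
  let count : Int := PySem.List.len sectors
  (PySem.List.pyRange 0 count 1).foldl (fun acc id0 =>
    let s0 := PySem.List.pyGetD sectors id0 (0, 0)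
    (PySem.List.pyRange (id0 + 1) count 1).foldl (fun acc id1 =>
      let s1 := PySem.List.pyGetD sectors id1 (0, 0)
      if ranks.contains (s1.2 - s0.2) then acc ++ [(id0, id1)] else acc) acc) []

-- ===== PORT B =====
-- buckets[s[1]].append(i) over enumerate(sectors) (setdefault+append = modify with default [])
def gms_buckets (sectors : List (Int × Int)) : PySem.Dict Int (List Int) :=
  (PySem.List.enumerate sectors 0).foldl
    (fun d q => PySem.Dict.modify d q.2.2 [] (fun t => t ++ [q.1])) PySem.Dict.empty

-- merged[p0] = sorted concatenation of all buckets reachable from p0 by a rank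
def gms_merged (ranks : List Int) (sectors : List (Int × Int)) : PySem.Dict Int (List Int) :=
  let buckets := gms_buckets sectors
  buckets.keys.foldl (fun m p0 =>
    let acc := buckets.items.foldl (fun c q =>
      if ranks.contains (q.1 - p0) then c ++ q.2 else c) []
    PySem.Dict.insert m p0 (PySem.List.sorted acc (fun x => x) false)) PySem.Dict.empty

def generate_mixing_sectors_alt (ranks : List Int) (sectors : List (Int × Int)) : List (Int × Int) :=
  let merged := gms_merged ranks sectors
  (PySem.List.enumerate sectors 0).foldl (fun out p =>
    out ++ ((PySem.Dict.getD merged p.2.2 []).filter (fun id1 => decide (p.1 < id1))).map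
      (fun id1 => (p.1, id1))) []

-- ===== PRECONDITION & SPEC =====
def Spec_generate_mixing_sectors (ranks : List Int) (sectors : List (Int × Int)) (out : List (Int × Int)) : Prop := out = generate_mixing_sectors_alt ranks sectors
instance (ranks : List Int) (sectors : List (Int × Int)) (out : List (Int × Int)) : Decidable (Spec_generate_mixing_sectors ranks sectors out) := by unfold Spec_generate_mixing_sectors; infer_instance

-- ===== CLAIM (what is proved, stated in full; the proofs are below) =====
def Claim_equal_generate_mixing_sectors : Prop := ∀ (ranks : List Int) (sectors : List (Int × Int)), Dom_generate_mixing_sectors ranks sectors → Spec_generate_mixing_sectors ranks sectors (generate_mixing_sectors ranks sectors)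

-- ===== LEMMAS AND PROOFS =====

-- particle count of sector i (as A reads it)
def gmsP (sectors : List (Int × Int)) (i : Int) : Int := (PySem.List.pyGetD sectors i (0, 0)).2

-- what bucket p of gms_buckets holds: indices of sectors with particle count p, in order
def gmsBucket (sectors : List (Int × Int)) (p : Int) : List Int :=
  ((PySem.List.enumerate sectors 0).filter (fun q => q.2.2 == p)).map (fun q => q.1)

-- the per-id0 chunk both programs emit
def gmsChunk (ranks : List Int) (sectors : List (Int × Int)) (id0 : Int) : List (Int × Int) :=
  ((PySem.List.pyRange (id0 + 1) (PySem.List.len sectors) 1).filter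
      (fun id1 => ranks.contains (gmsP sectors id1 - gmsP sectors id0))).map (fun id1 => (id0, id1))

lemma gms_buckets_foldl (l : List (Int × (Int × Int))) (d : PySem.Dict Int (List Int)) (p : Int) :
    PySem.Dict.getD
        (l.foldl (fun d q => PySem.Dict.modify d q.2.2 [] (fun t => t ++ [q.1])) d) p []
      = PySem.Dict.getD d p [] ++ (l.filter (fun q => q.2.2 == p)).map (fun q => q.1) := by
  induction l generalizing d with
  | nil => simp
  | cons q l ih =>
    simp only [List.foldl_cons, ih, List.filter_cons]
    rw [PySem.Dict.getD_modify]
    by_cases h : p = q.2.2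
    · simp [h]
    · have h' : ¬ q.2.2 = p := fun hq => h hq.symm
      simp [h, h']

lemma gms_bucket_getD (sectors : List (Int × Int)) (p : Int) :
    PySem.Dict.getD (gms_buckets sectors) p [] = gmsBucket sectors p := by
  unfold gms_buckets gmsBucket
  rw [gms_buckets_foldl]
  simp

lemma mem_gmsBucket (sectors : List (Int × Int)) (p i : Int) :
    i ∈ gmsBucket sectors p ↔ 0 ≤ i ∧ i < (sectors.length : Int) ∧ gmsP sectors i = p := by
  unfold gmsBucket gmsP
  simp only [List.mem_map, List.mem_filter, PySem.List.mem_enumerate_iff]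
  constructor
  · rintro ⟨q, ⟨⟨k, hk, rfl⟩, hp⟩, rfl⟩
    simp only [beq_iff_eq] at hp
    refine ⟨by positivity, by simp; exact_mod_cast hk, ?_⟩
    simp only [zero_add]
    rw [PySem.List.pyGetD_natCast, List.getD_eq_getElem _ _ hk, hp]
  · rintro ⟨h0, hn, hp⟩
    have hk : i.toNat < sectors.length := by omega
    have hi : ((i.toNat : Int)) = i := by omega
    have hpg : PySem.List.pyGetD sectors i (0, 0) = sectors[i.toNat] := by
      conv_lhs => rw [← hi]
      rw [PySem.List.pyGetD_natCast, List.getD_eq_getElem _ _ hk]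
    refine ⟨(0 + (i.toNat : Int), sectors[i.toNat]), ⟨⟨i.toNat, hk, rfl⟩, ?_⟩, ?_⟩
    · simp only [beq_iff_eq, hpg] at hp ⊢
      exact hp
    · show (0 : Int) + (i.toNat : Int) = i
      omega

lemma pairwise_gmsBucket (sectors : List (Int × Int)) (p : Int) :
    (gmsBucket sectors p).Pairwise (· < ·) :=
  ((PySem.List.pairwise_lt_enumerate sectors 0).filter _).map _ (fun _ _ h => h)

-- keys of gms_buckets: a key is present iff some sector has that particle count
lemma contains_gms_buckets_foldl (l : List (Int × (Int × Int))) (d : PySem.Dict Int (List Int)) (p : Int) :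
    (l.foldl (fun d q => PySem.Dict.modify d q.2.2 [] (fun t => t ++ [q.1])) d).contains p
      = (d.contains p || l.any (fun q => q.2.2 == p)) := by
  induction l generalizing d with
  | nil => simp
  | cons q l ih =>
    simp only [List.foldl_cons, ih, PySem.Dict.contains_modify, List.any_cons]
    have h1 : (p == q.2.2) = (q.2.2 == p) := by
      by_cases h : p = q.2.2
      · simp [h]
      · rw [beq_eq_false_iff_ne.mpr h, beq_eq_false_iff_ne.mpr (fun h' => h h'.symm)]
    rw [h1]
    cases q.2.2 == p <;> cases PySem.Dict.contains d p <;> simp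

lemma contains_gms_buckets (sectors : List (Int × Int)) (p : Int) :
    (gms_buckets sectors).contains p
      = (PySem.List.enumerate sectors 0).any (fun q => q.2.2 == p) := by
  unfold gms_buckets
  rw [contains_gms_buckets_foldl]
  simp

lemma nodup_keys_gms_buckets_foldl (l : List (Int × (Int × Int))) (d : PySem.Dict Int (List Int))
    (hd : d.keys.Nodup) :
    (l.foldl (fun d q => PySem.Dict.modify d q.2.2 [] (fun t => t ++ [q.1])) d).keys.Nodup := by
  induction l generalizing d with
  | nil => exact hd
  | cons q l ih =>
    simp only [List.foldl_cons]
    apply ih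
    rw [PySem.Dict.keys_modify]
    by_cases h : d.contains q.2.2
    · rwa [PySem.Dict.keys_insert_of_contains _ _ h]
    · rw [PySem.Dict.keys_insert_of_not_contains _ _ (by simpa using h)]
      refine List.Nodup.append hd (List.nodup_singleton _) ?_
      intro k hk hk'
      simp only [List.mem_singleton] at hk'
      subst hk'
      exact absurd ((PySem.Dict.contains_iff_mem_keys d _).mpr hk) (by simpa using h)

lemma nodup_keys_gms_buckets (sectors : List (Int × Int)) :
    (gms_buckets sectors).keys.Nodup :=
  nodup_keys_gms_buckets_foldl _ _ PySem.Dict.nodup_keys_empty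

-- every stored item is exactly its key's bucket
lemma snd_of_mem_items_gms_buckets (sectors : List (Int × Int)) {q : Int × List Int}
    (hq : q ∈ (gms_buckets sectors).items) : q.2 = gmsBucket sectors q.1 := by
  have h := PySem.Dict.get?_of_mem_items (gms_buckets sectors)
    (k := q.1) (v := q.2) (by exact hq) (nodup_keys_gms_buckets sectors)
  have := gms_bucket_getD sectors q.1
  rw [PySem.Dict.getD_eq_get?_getD, h] at this
  simp only [Option.getD_some] at this
  exact this

-- the heart, step 1: sorting the concatenation of the reachable buckets lists
-- exactly the indices whose particle difference is a rank, in increasing order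
lemma gms_sorted_merged (ranks : List Int) (sectors : List (Int × Int)) (p0 : Int) :
    PySem.List.sorted
        ((gms_buckets sectors).items.foldl (fun c q =>
          if ranks.contains (q.1 - p0) then c ++ q.2 else c) [])
        (fun x => x)
      = (PySem.List.pyRange 0 (PySem.List.len sectors) 1).filter
          (fun i => ranks.contains (gmsP sectors i - p0)) := by
  set g : Int × List Int → List Int :=
    fun q => if ranks.contains (q.1 - p0) then q.2 else [] with hg
  have hbody : ∀ (c : List Int), ∀ q ∈ (gms_buckets sectors).items,
      (if ranks.contains (q.1 - p0) then c ++ q.2 else c) = c ++ g q := by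
    intro c q _
    simp only [hg]
    split <;> simp
  rw [PySem.List.foldl_congr_mem _ _ (fun c q => c ++ g q) _ hbody,
    PySem.List.foldl_append_eq_flatMap, List.nil_append]
  have hmemg : ∀ q ∈ (gms_buckets sectors).items, ∀ i : Int, (i ∈ g q ↔
      ranks.contains (q.1 - p0) ∧ i ∈ gmsBucket sectors q.1) := by
    intro q hq i
    simp only [hg]
    rw [← snd_of_mem_items_gms_buckets sectors hq]
    split <;> rename_i h
    · simp only [h, true_and]
    · simp only [List.not_mem_nil, false_iff]
      intro hC
      exact h hC.1
  have hpw : ((gms_buckets sectors).items).Pairwise (fun a b => a.1 ≠ b.1) := by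
    have h := nodup_keys_gms_buckets sectors
    unfold PySem.Dict.keys at h
    exact (List.pairwise_map).mp h
  apply PySem.List.sorted_eq_of_perm_of_pairwise_lt
  · have hnodF : ((PySem.List.pyRange 0 (PySem.List.len sectors) 1).filter
        (fun i => ranks.contains (gmsP sectors i - p0))).Nodup :=
      ((PySem.List.pairwise_lt_pyRange_one _ _).filter _).imp (fun h => ne_of_lt h)
    have hnodC : (((gms_buckets sectors).items).flatMap g).Nodup := by
      rw [List.nodup_flatMap]
      constructor
      · intro q hq
        simp only [hg]
        split
        · rw [snd_of_mem_items_gms_buckets sectors hq]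
          exact (pairwise_gmsBucket sectors q.1).imp (fun h => ne_of_lt h)
        · exact List.nodup_nil
      · refine List.Pairwise.imp_of_mem ?_ hpw
        intro a b ha hb hne i hia hib
        have h1 := ((hmemg a ha i).mp hia).2
        have h2 := ((hmemg b hb i).mp hib).2
        rw [mem_gmsBucket] at h1 h2
        exact hne (h1.2.2 ▸ h2.2.2)
    rw [List.perm_ext_iff_of_nodup hnodF hnodC]
    intro i
    simp only [List.mem_filter, PySem.List.mem_pyRange_one, List.mem_flatMap,
      PySem.List.len_eq]
    constructor
    · rintro ⟨⟨h1, h2⟩, hc⟩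
      have hib : i ∈ gmsBucket sectors (gmsP sectors i) :=
        (mem_gmsBucket sectors _ i).mpr ⟨h1, by exact_mod_cast h2, rfl⟩
      have hany : (PySem.List.enumerate sectors 0).any (fun q => q.2.2 == gmsP sectors i) := by
        have hib' := hib
        unfold gmsBucket at hib'
        simp only [List.mem_map, List.mem_filter] at hib'
        obtain ⟨q, ⟨hq, hqp⟩, _⟩ := hib'
        exact List.any_eq_true.mpr ⟨q, hq, hqp⟩
      have hkey : gmsP sectors i ∈ (gms_buckets sectors).keys := by
        rw [← PySem.Dict.contains_iff_mem_keys, contains_gms_buckets]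
        exact hany
      unfold PySem.Dict.keys at hkey
      obtain ⟨q, hq, hq1⟩ := List.mem_map.mp hkey
      refine ⟨q, hq, (hmemg q hq i).mpr ⟨?_, by rw [hq1]; exact hib⟩⟩
      rw [hq1]
      exact hc
    · rintro ⟨q, hq, hi⟩
      obtain ⟨hc, hib⟩ := (hmemg q hq i).mp hi
      rw [mem_gmsBucket] at hib
      obtain ⟨hi0, hin, hip⟩ := hib
      rw [← hip] at hc
      exact ⟨⟨hi0, by exact_mod_cast hin⟩, hc⟩
  · exact (PySem.List.pairwise_lt_pyRange_one _ _).filter _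

-- building a dict by inserting F k under each key k of a list
lemma getD_foldl_insert (ks : List Int) (F : Int → List Int)
    (m : PySem.Dict Int (List Int)) (p : Int) :
    PySem.Dict.getD (ks.foldl (fun m k => PySem.Dict.insert m k (F k)) m) p []
      = if p ∈ ks then F p else PySem.Dict.getD m p [] := by
  induction ks generalizing m with
  | nil => simp
  | cons k ks ih =>
    simp only [List.foldl_cons, ih, List.mem_cons]
    by_cases hks : p ∈ ks
    · simp [hks]
    · rw [PySem.Dict.getD_insert]
      by_cases hk : p = k <;> simp [hk, hks]

lemma getD_gms_merged (ranks : List Int) (sectors : List (Int × Int)) (p : Int)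
    (hp : p ∈ (gms_buckets sectors).keys) :
    PySem.Dict.getD (gms_merged ranks sectors) p []
      = (PySem.List.pyRange 0 (PySem.List.len sectors) 1).filter
          (fun i => ranks.contains (gmsP sectors i - p)) := by
  unfold gms_merged
  rw [getD_foldl_insert (F := fun p0 => PySem.List.sorted
      ((gms_buckets sectors).items.foldl (fun c q =>
        if ranks.contains (q.1 - p0) then c ++ q.2 else c) []) (fun x => x) false)]
  rw [if_pos hp, gms_sorted_merged]

-- restricting the full index range to indices above id0
lemma pyRange_filter_gt (n id0 : Int) (h0 : 0 ≤ id0) (hn : id0 < n) :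
    (PySem.List.pyRange 0 n 1).filter (fun i => decide (id0 < i))
      = PySem.List.pyRange (id0 + 1) n 1 := by
  rw [PySem.List.pyRange_one_append 0 (id0 + 1) n (by omega) (by omega), List.filter_append]
  have h1 : (PySem.List.pyRange 0 (id0 + 1) 1).filter (fun i => decide (id0 < i)) = [] := by
    apply List.filter_eq_nil_iff.mpr
    intro a ha
    have := PySem.List.mem_pyRange_one.mp ha
    simp only [decide_eq_true_eq]
    omega
  have h2 : (PySem.List.pyRange (id0 + 1) n 1).filter (fun i => decide (id0 < i))
      = PySem.List.pyRange (id0 + 1) n 1 := by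
    apply List.filter_eq_self.mpr
    intro a ha
    have := PySem.List.mem_pyRange_one.mp ha
    simp only [decide_eq_true_eq]
    omega
  rw [h1, h2, List.nil_append]

-- sector j's particle count is a key of the buckets dict
lemma gmsP_mem_keys (sectors : List (Int × Int)) (j : Int) (h0 : 0 ≤ j)
    (hn : j < (sectors.length : Int)) :
    gmsP sectors j ∈ (gms_buckets sectors).keys := by
  have hib : j ∈ gmsBucket sectors (gmsP sectors j) :=
    (mem_gmsBucket sectors _ j).mpr ⟨h0, hn, rfl⟩
  unfold gmsBucket at hib
  simp only [List.mem_map, List.mem_filter] at hib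
  obtain ⟨q, ⟨hq, hqp⟩, _⟩ := hib
  rw [← PySem.Dict.contains_iff_mem_keys, contains_gms_buckets]
  exact List.any_eq_true.mpr ⟨q, hq, hqp⟩

-- ===== VERDICT (by name: the statement is the Claim_ definition above) =====
theorem generate_mixing_sectors_spec : Claim_equal_generate_mixing_sectors := by
  intro ranks sectors _
  unfold Spec_generate_mixing_sectors generate_mixing_sectors generate_mixing_sectors_alt
  simp only []
  -- A side: inner loop is append-if, outer loop appends a chunk
  rw [PySem.List.foldl_congr_mem _ _ (fun acc id0 => acc ++ gmsChunk ranks sectors id0) _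
      (by
        intro acc id0 _
        rw [PySem.List.foldl_append_if (fun id1 =>
          ranks.contains ((PySem.List.pyGetD sectors id1 (0, 0)).2
            - (PySem.List.pyGetD sectors id0 (0, 0)).2)) (fun id1 => (id0, id1))]
        rfl),
    PySem.List.foldl_append_eq_flatMap, List.nil_append]
  -- B side: outer loop appends its chunk from the precomputed merged lists
  rw [PySem.List.foldl_congr_mem _ _ (fun out p => out ++
        ((PySem.Dict.getD (gms_merged ranks sectors) p.2.2 []).filter
          (fun id1 => decide (p.1 < id1))).map (fun id1 => (p.1, id1)))
      _ (by intro out p _; rfl),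
    PySem.List.foldl_append_eq_flatMap, List.nil_append,
    PySem.List.enumerate_eq_map_pyRange sectors (0, 0), List.flatMap_map]
  apply List.flatMap_congr
  intro j hj
  have h0 : 0 ≤ j := (PySem.List.mem_pyRange_one.mp hj).1
  have hn : j < (sectors.length : Int) := by
    have := (PySem.List.mem_pyRange_one.mp hj).2
    simpa using this
  show gmsChunk ranks sectors j
      = ((PySem.Dict.getD (gms_merged ranks sectors) (gmsP sectors j) []).filter
          (fun id1 => decide (j < id1))).map (fun id1 => (j, id1))
  rw [getD_gms_merged ranks sectors _ (gmsP_mem_keys sectors j h0 hn),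
    List.filter_comm, pyRange_filter_gt _ _ h0 (by simpa using hn)]
  rfl
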